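-- pv_equiv track=rewrite | github.com/mjyt13/multimedia | diagrams1.py | define_data
-- ===== SOURCE A (Python) =====
-- def define_data(used_points):
--     x = [];y_pos = [];y_neg = []
--     for func_points in used_points:
--         for i in range(0, len(func_points)):
--             if i == len(x):
--                 x.append(func_points[i][0])
--             if i == len(y_neg):  # нет нужды проверять оба списка
--                 y_pos.append(0)
--                 y_neg.append(0)
--             if func_points[i][1] > 0:
--                 y_pos[i] += func_points[i][1]
--             if func_points[i][1] < 0:
--                 y_neg[i] += func_points[i][1]
--     return x, y_pos, y_neg
-- ===== SOURCE B (Python) =====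
-- def define_data(used_points):
--     n = max((len(fp) for fp in used_points), default=0)
--     x = []; y_pos = []; y_neg = []
--     for i in range(n):
--         x.append(next(fp[i][0] for fp in used_points if len(fp) > i))
--         y_pos.append(sum(fp[i][1] for fp in used_points if len(fp) > i and fp[i][1] > 0))
--         y_neg.append(sum(fp[i][1] for fp in used_points if len(fp) > i and fp[i][1] < 0))
--     return x, y_pos, y_neg
-- ===== Notes on version B (the rewrite author's own statement) =====
-- stated objective: alternative
-- what changed: B replaces A's incremental row-wise pass (walking each point list and appending/extending running x, y_pos, y_neg lists with length checks) by a column-wise aggregation: it computes n = max list length once, then for each index i takes x[i] from the first list reaching i and sums the positive and negative y-values over all lists reaching i.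
import Mathlib
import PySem

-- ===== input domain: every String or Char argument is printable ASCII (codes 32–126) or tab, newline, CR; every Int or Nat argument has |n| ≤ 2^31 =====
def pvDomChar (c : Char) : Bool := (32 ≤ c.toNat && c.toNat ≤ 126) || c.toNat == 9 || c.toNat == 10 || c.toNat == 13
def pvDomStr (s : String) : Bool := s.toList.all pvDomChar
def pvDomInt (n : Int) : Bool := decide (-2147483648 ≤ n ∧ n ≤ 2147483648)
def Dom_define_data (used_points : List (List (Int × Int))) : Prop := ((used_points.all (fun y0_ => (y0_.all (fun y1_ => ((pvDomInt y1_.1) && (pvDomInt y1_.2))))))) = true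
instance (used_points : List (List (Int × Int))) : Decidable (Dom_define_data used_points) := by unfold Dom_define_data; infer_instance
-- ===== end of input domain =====

-- B aggregates column-wise (per index i over all lists) instead of A's incremental row-wise
-- appends; same return value, alternative decomposition (no speed claim).

-- ===== PORT A =====
-- one iteration of A's inner `for i in range(0, len(func_points))` body
def aStep (fp : List (Int × Int)) (st : List Int × List Int × List Int) (i : Nat) :
    List Int × List Int × List Int :=
  let x := st.1
  let yp := st.2.1
  let yn := st.2.2
  let p := fp.getD i (0, 0)       -- fp[i]; i < len fp always holds in the loop
  let x := if i = x.length then x ++ [p.1] else x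
  let yp' := if i = yn.length then yp ++ [0] else yp
  let yn' := if i = yn.length then yn ++ [0] else yn
  let yp' := if p.2 > 0 then yp'.set i (yp'.getD i 0 + p.2) else yp'
  let yn' := if p.2 < 0 then yn'.set i (yn'.getD i 0 + p.2) else yn'
  (x, yp', yn')

def define_data (used_points : List (List (Int × Int))) : List Int × List Int × List Int :=
  used_points.foldl (fun st fp => (List.range fp.length).foldl (aStep fp) st) ([], [], [])

-- ===== PORT B =====
-- n = max(len(fp) for fp in used_points, default=0)
def maxLen (ls : List (List (Int × Int))) : Nat :=
  ls.foldl (fun m fp => max m fp.length) 0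

-- next(fp[i][0] for fp in used_points if len(fp) > i)  (always found for i < maxLen)
def firstX (ls : List (List (Int × Int))) (i : Nat) : Int :=
  match ls.find? (fun fp => decide (i < fp.length)) with
  | some fp => (fp.getD i (0, 0)).1
  | none => 0

-- sum(fp[i][1] for fp in used_points if len(fp) > i and fp[i][1] > 0)
def colPos (ls : List (List (Int × Int))) (i : Nat) : Int :=
  ls.foldl (fun s fp =>
    if i < fp.length ∧ 0 < (fp.getD i (0, 0)).2 then s + (fp.getD i (0, 0)).2 else s) 0

-- sum(fp[i][1] for fp in used_points if len(fp) > i and fp[i][1] < 0)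
def colNeg (ls : List (List (Int × Int))) (i : Nat) : Int :=
  ls.foldl (fun s fp =>
    if i < fp.length ∧ (fp.getD i (0, 0)).2 < 0 then s + (fp.getD i (0, 0)).2 else s) 0

def define_data_alt (used_points : List (List (Int × Int))) : List Int × List Int × List Int :=
  ((List.range (maxLen used_points)).map (firstX used_points),
   (List.range (maxLen used_points)).map (colPos used_points),
   (List.range (maxLen used_points)).map (colNeg used_points))

-- ===== PRECONDITION & SPEC =====
def Spec_define_data (used_points : List (List (Int × Int))) (out : List Int × List Int × List Int) : Prop := out = define_data_alt used_points
instance (used_points : List (List (Int × Int))) (out : List Int × List Int × List Int) : Decidable (Spec_define_data used_points out) := by unfold Spec_define_data; infer_instance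

-- ===== CLAIM (what is proved, stated in full; the proofs are below) =====
def Claim_equal_define_data : Prop := ∀ (used_points : List (List (Int × Int))), Dom_define_data used_points → Spec_define_data used_points (define_data used_points)

-- ===== LEMMAS AND PROOFS =====

theorem maxLen_append (ls : List (List (Int × Int))) (fp : List (Int × Int)) :
    maxLen (ls ++ [fp]) = max (maxLen ls) fp.length := by
  simp [maxLen, List.foldl_append]

theorem lt_maxLen_iff (ls : List (List (Int × Int))) (i : Nat) :
    i < maxLen ls ↔ ∃ fp ∈ ls, i < fp.length := by
  induction ls using List.reverseRecOn with
  | nil => simp [maxLen]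
  | append_singleton ls fp ih =>
      rw [maxLen_append]
      constructor
      · intro h
        rcases Nat.lt_or_ge i (maxLen ls) with h' | h'
        · obtain ⟨g, hg, hgi⟩ := ih.mp h'
          exact ⟨g, by simp [hg], hgi⟩
        · exact ⟨fp, by simp, by omega⟩
      · rintro ⟨g, hg, hgi⟩
        rcases List.mem_append.mp hg with h' | h'
        · have := ih.mpr ⟨g, h', hgi⟩; omega
        · simp at h'; subst h'; omega

theorem colPos_of_maxLen_le (ls : List (List (Int × Int))) (i : Nat) (h : maxLen ls ≤ i) :
    colPos ls i = 0 := by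
  have hall : ∀ fp ∈ ls, ¬ i < fp.length := by
    intro fp hfp hlt
    have := (lt_maxLen_iff ls i).mpr ⟨fp, hfp, hlt⟩; omega
  clear h
  unfold colPos
  induction ls with
  | nil => rfl
  | cons g ls ih =>
      have hg := hall g (by simp)
      simp only [List.foldl_cons, hg, false_and, if_false]
      exact ih (fun fp hfp hlt => hall fp (by simp [hfp]) hlt)

theorem colNeg_of_maxLen_le (ls : List (List (Int × Int))) (i : Nat) (h : maxLen ls ≤ i) :
    colNeg ls i = 0 := by
  have hall : ∀ fp ∈ ls, ¬ i < fp.length := by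
    intro fp hfp hlt
    have := (lt_maxLen_iff ls i).mpr ⟨fp, hfp, hlt⟩; omega
  clear h
  unfold colNeg
  induction ls with
  | nil => rfl
  | cons g ls ih =>
      have hg := hall g (by simp)
      simp only [List.foldl_cons, hg, false_and, if_false]
      exact ih (fun fp hfp hlt => hall fp (by simp [hfp]) hlt)

theorem colPos_append (ls : List (List (Int × Int))) (fp : List (Int × Int)) (i : Nat) :
    colPos (ls ++ [fp]) i =
      colPos ls i + (if i < fp.length ∧ 0 < (fp.getD i (0, 0)).2 then (fp.getD i (0, 0)).2 else 0) := by
  unfold colPos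
  rw [List.foldl_append]
  simp only [List.foldl_cons, List.foldl_nil]
  split_ifs <;> simp

theorem colNeg_append (ls : List (List (Int × Int))) (fp : List (Int × Int)) (i : Nat) :
    colNeg (ls ++ [fp]) i =
      colNeg ls i + (if i < fp.length ∧ (fp.getD i (0, 0)).2 < 0 then (fp.getD i (0, 0)).2 else 0) := by
  unfold colNeg
  rw [List.foldl_append]
  simp only [List.foldl_cons, List.foldl_nil]
  split_ifs <;> simp

theorem firstX_append (ls : List (List (Int × Int))) (fp : List (Int × Int)) (i : Nat) :
    firstX (ls ++ [fp]) i =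
      if i < maxLen ls then firstX ls i else firstX [fp] i := by
  unfold firstX
  rw [List.find?_append]
  cases h : ls.find? (fun fp => decide (i < fp.length)) with
  | some g =>
      have hmem := List.find?_some h
      have hin := List.mem_of_find?_eq_some h
      simp at hmem
      have : i < maxLen ls := (lt_maxLen_iff ls i).mpr ⟨g, hin, hmem⟩
      simp [this]
  | none =>
      have : ¬ i < maxLen ls := by
        intro hlt
        obtain ⟨g, hg, hgi⟩ := (lt_maxLen_iff ls i).mp hlt
        have := List.find?_eq_none.mp h g hg
        simp at this; omega
      simp [this]

-- the intermediate state of A's inner loop over fp, after processing indices 0..k-1,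
-- starting from the columnar state of ls
def innerState (ls : List (List (Int × Int))) (fp : List (Int × Int)) (k : Nat) :
    List Int × List Int × List Int :=
  ((List.range (max (maxLen ls) k)).map
     (fun j => if j < maxLen ls then firstX ls j else (fp.getD j (0, 0)).1),
   (List.range (max (maxLen ls) k)).map
     (fun j => colPos ls j + (if j < k ∧ 0 < (fp.getD j (0, 0)).2 then (fp.getD j (0, 0)).2 else 0)),
   (List.range (max (maxLen ls) k)).map
     (fun j => colNeg ls j + (if j < k ∧ (fp.getD j (0, 0)).2 < 0 then (fp.getD j (0, 0)).2 else 0)))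

theorem innerState_zero (ls : List (List (Int × Int))) (fp : List (Int × Int)) :
    innerState ls fp 0 = define_data_alt ls := by
  unfold innerState define_data_alt
  refine Prod.ext ?_ (Prod.ext ?_ ?_) <;>
    · simp only [Nat.max_zero]
      apply List.map_congr_left
      intro j hj
      simp only [List.mem_range] at hj
      simp [hj]

theorem set_last (xs : List Int) (a b : Int) (k : Nat) (h : xs.length = k) :
    (xs ++ [a]).set k b = xs ++ [b] := by
  subst h; rw [List.set_append_right _ _ (le_refl _)]; simp

theorem getD_last (xs : List Int) (a : Int) (k : Nat) (h : xs.length = k) :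
    (xs ++ [a]).getD k 0 = a := by
  subst h; simp [List.getD_eq_getElem?_getD]

theorem getD_map_range' (n k : Nat) (g : Nat → Int) (h : k < n) :
    ((List.range n).map g).getD k 0 = g k := by
  simp [List.getD_eq_getElem?_getD, h]

theorem append_last_eq_map_range (k : Nat) (g : Nat → Int) (xs : List Int) (c : Int)
    (hlen : xs.length = k) (hpre : ∀ j, (h : j < k) → xs[j]'(by omega) = g j) (hc : c = g k) :
    xs ++ [c] = (List.range (k + 1)).map g := by
  apply List.ext_getElem
  · simp [hlen]
  · intro j hj hj'
    simp only [List.length_append, List.length_singleton, hlen] at hj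
    by_cases h : j < k
    · rw [List.getElem_append_left (by omega), List.getElem_map, List.getElem_range]
      exact hpre j h
    · have hjk : j = k := by omega
      subst hjk
      rw [List.getElem_append_right (by omega)]
      simp [hlen, hc]

theorem innerState_step (ls : List (List (Int × Int))) (fp : List (Int × Int)) (k : Nat)
    (hk : k < fp.length) :
    aStep fp (innerState ls fp k) k = innerState ls fp (k + 1) := by
  unfold aStep innerState
  simp only [List.length_map, List.length_range, Prod.mk.injEq]
  by_cases hnk : maxLen ls ≤ k
  · -- n ≤ k: the three lists have length k, so all three appends fire
    have hmax : max (maxLen ls) k = k := by omega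
    have hmax' : max (maxLen ls) (k + 1) = k + 1 := by omega
    have hcx : colPos ls k = 0 := colPos_of_maxLen_le ls k hnk
    have hcn : colNeg ls k = 0 := colNeg_of_maxLen_le ls k hnk
    rw [hmax, hmax']
    rw [if_pos rfl]
    refine ⟨?_, ?_, ?_⟩
    · refine append_last_eq_map_range _ _ _ _ (by simp) (fun j hj => ?_) ?_
      · simp only [List.getElem_map, List.getElem_range]
      · rw [if_neg (by omega)]
    · by_cases hp : 0 < (fp.getD k (0, 0)).2
      · simp only [hp, if_pos]
        rw [getD_last _ _ _ (by simp), set_last _ _ _ _ (by simp)]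
        refine append_last_eq_map_range _ _ _ _ (by simp) (fun j hj => ?_) ?_
        · simp only [List.getElem_map, List.getElem_range]
          congr 1
          exact if_congr (and_congr_left' (by omega)) rfl rfl
        · rw [hcx, if_pos ⟨Nat.lt_succ_self k, hp⟩]
      · simp only [hp, if_false]
        refine append_last_eq_map_range _ _ _ _ (by simp) (fun j hj => ?_) ?_
        · simp only [List.getElem_map, List.getElem_range]
          congr 1
          exact if_congr (and_congr_left' (by omega)) rfl rfl
        · rw [hcx, if_neg (fun h => hp h.2)]
          simp
    · by_cases hp : (fp.getD k (0, 0)).2 < 0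
      · simp only [hp, if_pos]
        rw [getD_last _ _ _ (by simp), set_last _ _ _ _ (by simp)]
        refine append_last_eq_map_range _ _ _ _ (by simp) (fun j hj => ?_) ?_
        · simp only [List.getElem_map, List.getElem_range]
          congr 1
          exact if_congr (and_congr_left' (by omega)) rfl rfl
        · rw [hcn, if_pos ⟨Nat.lt_succ_self k, hp⟩]
      · simp only [hp, if_false]
        refine append_last_eq_map_range _ _ _ _ (by simp) (fun j hj => ?_) ?_
        · simp only [List.getElem_map, List.getElem_range]
          congr 1
          exact if_congr (and_congr_left' (by omega)) rfl rfl
        · rw [hcn, if_neg (fun h => hp h.2)]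
          simp
  · -- k < n: no appends, only possible in-place updates
    have hmax : max (maxLen ls) k = maxLen ls := by omega
    have hmax' : max (maxLen ls) (k + 1) = maxLen ls := by omega
    rw [hmax, hmax']
    simp only [if_neg (show ¬ k = maxLen ls by omega)]
    refine ⟨by trivial, ?_, ?_⟩
    · by_cases hp : 0 < (fp.getD k (0, 0)).2
      · simp only [hp, if_pos]
        rw [getD_map_range' _ _ _ (by omega)]
        apply List.ext_getElem
        · simp
        · intro j hj hj'
          simp only [List.length_map, List.length_range] at hj'
          rw [List.getElem_set]
          simp only [List.getElem_map, List.getElem_range]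
          by_cases hjk : k = j
          · subst hjk
            rw [if_pos rfl, if_neg (fun h => absurd h.1 (by omega)),
                if_pos ⟨Nat.lt_succ_self k, hp⟩]
            ring
          · rw [if_neg hjk]
            congr 1
            exact if_congr (and_congr_left' (by omega)) rfl rfl
      · simp only [hp, if_false]
        refine List.map_congr_left (fun j hj => ?_)
        simp only [List.mem_range] at hj
        congr 1
        by_cases hjk : j = k
        · subst hjk
          rw [if_neg (fun h => absurd h.1 (by omega)), if_neg (fun h => hp h.2)]
        · exact if_congr (and_congr_left' (by omega)) rfl rfl
    · by_cases hp : (fp.getD k (0, 0)).2 < 0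
      · simp only [hp, if_pos]
        rw [getD_map_range' _ _ _ (by omega)]
        apply List.ext_getElem
        · simp
        · intro j hj hj'
          simp only [List.length_map, List.length_range] at hj'
          rw [List.getElem_set]
          simp only [List.getElem_map, List.getElem_range]
          by_cases hjk : k = j
          · subst hjk
            rw [if_pos rfl, if_neg (fun h => absurd h.1 (by omega)),
                if_pos ⟨Nat.lt_succ_self k, hp⟩]
            ring
          · rw [if_neg hjk]
            congr 1
            exact if_congr (and_congr_left' (by omega)) rfl rfl
      · simp only [hp, if_false]
        refine List.map_congr_left (fun j hj => ?_)
        simp only [List.mem_range] at hj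
        congr 1
        by_cases hjk : j = k
        · subst hjk
          rw [if_neg (fun h => absurd h.1 (by omega)), if_neg (fun h => hp h.2)]
        · exact if_congr (and_congr_left' (by omega)) rfl rfl

theorem innerLoop_eq (ls : List (List (Int × Int))) (fp : List (Int × Int)) (k : Nat)
    (hk : k ≤ fp.length) :
    (List.range k).foldl (aStep fp) (define_data_alt ls) = innerState ls fp k := by
  induction k with
  | zero => simp [innerState_zero]
  | succ k ih =>
      rw [List.range_succ, List.foldl_append, ih (by omega)]
      simp only [List.foldl_cons, List.foldl_nil]
      exact innerState_step ls fp k (by omega)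

theorem innerState_final (ls : List (List (Int × Int))) (fp : List (Int × Int)) :
    innerState ls fp fp.length = define_data_alt (ls ++ [fp]) := by
  unfold innerState define_data_alt
  have hmax : max (maxLen ls) fp.length = maxLen (ls ++ [fp]) := (maxLen_append ls fp).symm
  refine Prod.ext ?_ (Prod.ext ?_ ?_)
  · rw [hmax]
    apply List.map_congr_left
    intro j hj
    rw [firstX_append]
    by_cases h : j < maxLen ls
    · simp [h]
    · simp only [h, if_false]
      simp only [List.mem_range, ← hmax] at hj
      have hjf : j < fp.length := by omega
      simp [firstX, hjf]
  · rw [hmax]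
    apply List.map_congr_left
    intro j hj
    rw [colPos_append]
  · rw [hmax]
    apply List.map_congr_left
    intro j hj
    rw [colNeg_append]

theorem define_data_eq_alt (ls : List (List (Int × Int))) :
    define_data ls = define_data_alt ls := by
  unfold define_data
  induction ls using List.reverseRecOn with
  | nil => simp [define_data_alt, maxLen]
  | append_singleton ls fp ih =>
      rw [List.foldl_append, ih]
      simp only [List.foldl_cons, List.foldl_nil]
      rw [innerLoop_eq ls fp fp.length (le_refl _), innerState_final]

-- ===== VERDICT (by name: the statement is the Claim_ definition above) =====
theorem define_data_spec : Claim_equal_define_data := by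
  intro used_points _
  unfold Spec_define_data
  exact define_data_eq_alt used_points
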